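-- pv_equiv track=rewrite | github.com/Deviloxide/Euler-Project | Problem 085 - Counting Rectangles.py | closest_rectangle
-- ===== SOURCE A (Python) =====
-- def closest_rectangle(target, limit):
--     closest = target
--     area = 0
--
--     for width in range(1, limit):
--         for height in range(1, limit):
--             total = 0
--
--             for a in range(1, width + 1):
--                 for b in range(1, height + 1):
--                     total += ((width - a) + 1) * ((height - b) + 1)
--
--             if abs(target - total) < closest:
--                 pair = [width, height]
--                 closest = abs(target - total)
--                 area = width * height
--
--     return "Sides: {}".format(pair), "Off-Target by {}".format(closest), "Area: {}".format(area)
-- ===== SOURCE B (Python) =====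
-- def closest_rectangle(target, limit):
--     # Closed form: a w x h grid contains (w(w+1)/2)*(h(h+1)/2) sub-rectangles.
--     # Build all candidate cells once, then take the first minimum by distance to target.
--     cells = [
--         (abs(target - (w * (w + 1) // 2) * (h * (h + 1) // 2)), w * h, [w, h])
--         for w in range(1, limit)
--         for h in range(1, limit)
--     ]
--     closest, area, pair = min(cells, key=lambda c: c[0])
--     return "Sides: {}".format(pair), "Off-Target by {}".format(closest), "Area: {}".format(area)
-- ===== Notes on version B (the rewrite author's own statement) =====
-- stated objective: faster
-- what changed: B replaces A's four nested loops by one pass: it builds the list of (|target-total|, area, sides) candidates using the closed form (w(w+1)/2)*(h(h+1)/2) for the sub-rectangle count and selects the answer with a single min(key=...) call (min returns the first minimum, matching A's strict-improvement scan).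
import Mathlib
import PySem

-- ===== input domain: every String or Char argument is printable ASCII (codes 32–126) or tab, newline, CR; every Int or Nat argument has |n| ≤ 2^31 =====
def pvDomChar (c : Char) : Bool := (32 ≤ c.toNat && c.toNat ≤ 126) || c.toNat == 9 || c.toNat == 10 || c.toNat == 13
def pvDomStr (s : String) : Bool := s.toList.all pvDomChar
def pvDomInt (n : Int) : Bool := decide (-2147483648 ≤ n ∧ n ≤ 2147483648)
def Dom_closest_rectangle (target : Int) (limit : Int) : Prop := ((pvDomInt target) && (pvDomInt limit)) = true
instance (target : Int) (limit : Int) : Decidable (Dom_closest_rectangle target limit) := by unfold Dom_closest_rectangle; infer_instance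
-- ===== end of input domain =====

-- B replaces A's four nested loops by building the candidate list once with the closed form
-- (w(w+1)/2)*(h(h+1)/2) for the sub-rectangle count and taking the first minimum with min(key=...):
-- O(limit^2) instead of O(limit^4).

-- ===== PORT A =====
-- Python's abs on int
def pvAbs (x : Int) : Int := if x < 0 then -x else x

-- A's inner double loop computing 'total' by enumerating all sub-rectangle positions
def pvTotalA (width height : Int) : Int :=
  (PySem.List.pyRange 1 (width + 1) 1).foldl (fun t a =>
    (PySem.List.pyRange 1 (height + 1) 1).foldl (fun t b =>
      t + ((width - a) + 1) * ((height - b) + 1)) t) 0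

-- the body of A's 'if abs(target - total) < closest:' update
def pvUpd (target : Int) (st : Int × Int × Option (Int × Int)) (width height total : Int) :
    Int × Int × Option (Int × Int) :=
  if pvAbs (target - total) < st.1 then (pvAbs (target - total), width * height, some (width, height))
  else st

def pvLoopA (target limit : Int) : Int × Int × Option (Int × Int) :=
  (PySem.List.pyRange 1 limit 1).foldl (fun st width =>
    (PySem.List.pyRange 1 limit 1).foldl (fun st height =>
      pvUpd target st width height (pvTotalA width height)) st)
    (target, 0, none)

def closest_rectangle (target : Int) (limit : Int) : String × String × String :=
  match pvLoopA target limit with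
  | (closest, area, some (w, h)) =>
      ("Sides: [" ++ PySem.Int.toStr w ++ ", " ++ PySem.Int.toStr h ++ "]",
       "Off-Target by " ++ PySem.Int.toStr closest,
       "Area: " ++ PySem.Int.toStr area)
  | (_, _, none) => ("", "", "")  -- unreachable inside Pre_: Python A raises UnboundLocalError here

-- ===== PORT B =====
-- Source B's comprehension: one (|target-total|, area, sides) candidate per (w, h), row-major
def pvCells (target limit : Int) : List (Int × Int × (Int × Int)) :=
  (PySem.List.pyRange 1 limit 1).flatMap (fun w =>
    (PySem.List.pyRange 1 limit 1).map (fun h =>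
      (|target - PySem.Int.floordiv (w * (w + 1)) 2 * PySem.Int.floordiv (h * (h + 1)) 2|,
       w * h, (w, h))))

def closest_rectangle_alt (target : Int) (limit : Int) : String × String × String :=
  match PySem.List.min? (pvCells target limit) (fun c => c.1) with
  | some (closest, area, w, h) =>
      ("Sides: [" ++ PySem.Int.toStr w ++ ", " ++ PySem.Int.toStr h ++ "]",
       "Off-Target by " ++ PySem.Int.toStr closest,
       "Area: " ++ PySem.Int.toStr area)
  | none => ("", "", "")  -- unreachable inside Pre_: Python B raises ValueError (min of empty list)

-- ===== PRECONDITION & SPEC =====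
-- Pre_ excludes exactly the inputs where A raises UnboundLocalError ('pair' never assigned):
-- the update fires at width = height = 1 iff target ≥ 1, and the loops run iff limit ≥ 2.
def Pre_closest_rectangle (target : Int) (limit : Int) : Prop := 1 ≤ target ∧ 2 ≤ limit
instance (target : Int) (limit : Int) : Decidable (Pre_closest_rectangle target limit) := by
  unfold Pre_closest_rectangle; infer_instance

def pvWitness_closest_rectangle : Int × Int := (20, 6)

def Spec_closest_rectangle (target : Int) (limit : Int) (out : String × String × String) : Prop :=
  out = closest_rectangle_alt target limit
instance (target : Int) (limit : Int) (out : String × String × String) :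
    Decidable (Spec_closest_rectangle target limit out) := by
  unfold Spec_closest_rectangle; infer_instance

-- ===== CLAIM (what is proved, stated in full; the proofs are below) =====
def Claim_equal_closest_rectangle : Prop := ∀ (target : Int) (limit : Int),
  Dom_closest_rectangle target limit → Pre_closest_rectangle target limit →
  Spec_closest_rectangle target limit (closest_rectangle target limit)

-- ===== LEMMAS AND PROOFS =====

-- abbreviations for the proofs (states and candidate cells)
def pvStep (st : Int × Int × Option (Int × Int)) (c : Int × Int × (Int × Int)) :
    Int × Int × Option (Int × Int) :=
  if c.1 < st.1 then (c.1, c.2.1, some c.2.2) else st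

def pvInj (c : Int × Int × (Int × Int)) : Int × Int × Option (Int × Int) :=
  (c.1, c.2.1, some c.2.2)

def pvG (m n : Int × Int × Option (Int × Int)) : Int × Int × Option (Int × Int) :=
  if n.1 < m.1 then n else m

def pvGC (m n : Int × Int × (Int × Int)) : Int × Int × (Int × Int) :=
  if n.1 < m.1 then n else m

-- Gauss-style sum over List.range, generalized so the induction goes through
lemma pv_aux_sum (m : Nat) (c : Int) :
    2 * (((List.range m).map (fun k : Nat => c - (k : Int))).sum) = 2 * c * m - (m : Int) * ((m : Int) - 1) := by
  induction m with
  | zero => simp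
  | succ n ih =>
    rw [List.range_succ, List.map_append, List.sum_append]
    simp only [List.map_cons, List.map_nil, List.sum_cons, List.sum_nil]
    push_cast
    push_cast at ih
    linarith

lemma pv_Srange_eq (n : Int) (hn : 0 ≤ n) :
    PySem.Int.floordiv (n * (n + 1)) 2 =
      ((PySem.List.pyRange 1 (n + 1) 1).map (fun a => (n - a) + 1)).sum := by
  have h1 := PySem.List.pyRange_one 1 (n + 1)
  have hnn : (n + 1 - 1 : Int) = n := by ring
  rw [hnn] at h1
  have h2 : ((PySem.List.pyRange 1 (n + 1) 1).map (fun a => (n - a) + 1)).sum =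
      ((List.range n.toNat).map (fun k : Nat => n - (k : Int))).sum := by
    rw [h1, List.map_map]
    have hfun : ((fun a => (n - a) + 1) ∘ (fun k : Nat => 1 + (k : Int))) = fun k : Nat => n - (k : Int) := by
      funext k; simp [Function.comp]; ring
    rw [hfun]
  have h3 := pv_aux_sum n.toNat n
  have hc : ((n.toNat : Int)) = n := Int.toNat_of_nonneg hn
  rw [hc] at h3
  have h4 : n * (n + 1) = 2 * ((List.range n.toNat).map (fun k : Nat => n - (k : Int))).sum := by linarith
  rw [h2, h4, PySem.Int.floordiv_eq_ediv_of_pos (by norm_num)]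
  exact Int.mul_ediv_cancel_left _ (by norm_num)

lemma pv_totalA_eq (w h : Int) (hw : 1 ≤ w) (hh : 1 ≤ h) :
    pvTotalA w h = PySem.Int.floordiv (w * (w + 1)) 2 * PySem.Int.floordiv (h * (h + 1)) 2 := by
  unfold pvTotalA
  have step : ∀ (t a : Int),
      (PySem.List.pyRange 1 (h + 1) 1).foldl (fun t b => t + ((w - a) + 1) * ((h - b) + 1)) t
        = t + ((w - a) + 1) * ((PySem.List.pyRange 1 (h + 1) 1).map (fun b => (h - b) + 1)).sum := by
    intro t a
    rw [PySem.List.foldl_add]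
    congr 1
    exact List.sum_map_mul_left _ _ _
  calc (PySem.List.pyRange 1 (w + 1) 1).foldl (fun t a =>
        (PySem.List.pyRange 1 (h + 1) 1).foldl (fun t b => t + ((w - a) + 1) * ((h - b) + 1)) t) 0
      = (PySem.List.pyRange 1 (w + 1) 1).foldl (fun t a =>
          t + ((w - a) + 1) * ((PySem.List.pyRange 1 (h + 1) 1).map (fun b => (h - b) + 1)).sum) 0 :=
        PySem.List.foldl_congr_mem _ _ _ _ (fun t a _ => step t a)
    _ = ((PySem.List.pyRange 1 (w + 1) 1).map (fun a =>
          ((w - a) + 1) * ((PySem.List.pyRange 1 (h + 1) 1).map (fun b => (h - b) + 1)).sum)).sum := by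
        rw [PySem.List.foldl_add]; simp
    _ = ((PySem.List.pyRange 1 (w + 1) 1).map (fun a => (w - a) + 1)).sum *
          ((PySem.List.pyRange 1 (h + 1) 1).map (fun b => (h - b) + 1)).sum :=
        List.sum_map_mul_right _ _ _
    _ = PySem.Int.floordiv (w * (w + 1)) 2 * PySem.Int.floordiv (h * (h + 1)) 2 := by
        rw [pv_Srange_eq w (by omega), pv_Srange_eq h (by omega)]

lemma pv_abs_eq (x : Int) : pvAbs x = |x| := by
  unfold pvAbs; split_ifs with h
  · rw [abs_of_neg h]
  · rw [abs_of_nonneg (by omega)]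

-- A's nested loops, rewritten as one fold of pvStep over B's candidate list
lemma pv_loopA_eq_fold (target limit : Int) :
    pvLoopA target limit = (pvCells target limit).foldl pvStep (target, 0, none) := by
  unfold pvLoopA pvCells
  rw [List.foldl_flatMap]
  refine PySem.List.foldl_congr_mem _ _ _ _ (fun st w hw => ?_)
  rw [List.foldl_map]
  refine PySem.List.foldl_congr_mem _ _ _ _ (fun st h hh => ?_)
  have hw1 : 1 ≤ w := ((PySem.List.mem_pyRange_one).1 hw).1
  have hh1 : 1 ≤ h := ((PySem.List.mem_pyRange_one).1 hh).1
  rw [pvUpd, pv_totalA_eq w h hw1 hh1, pvStep]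
  simp [pv_abs_eq]

-- pvG is the leftmost-minimum combine; it is associative
lemma pv_g_assoc (s t u : Int × Int × Option (Int × Int)) :
    pvG (pvG s t) u = pvG s (pvG t u) := by
  unfold pvG; split_ifs <;> first | rfl | omega

lemma pv_fold_g_assoc (l : List (Int × Int × Option (Int × Int)))
    (s t : Int × Int × Option (Int × Int)) :
    l.foldl pvG (pvG s t) = pvG s (l.foldl pvG t) := by
  induction l generalizing t with
  | nil => rfl
  | cons u l ih =>
    show l.foldl pvG (pvG (pvG s t) u) = _
    rw [pv_g_assoc, ih]
    rfl

-- pvInj turns the candidate combine into the state combine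
lemma pv_g_inj (m c : Int × Int × (Int × Int)) : pvG (pvInj m) (pvInj c) = pvInj (pvGC m c) := by
  unfold pvG pvGC pvInj; split_ifs <;> rfl

lemma pv_fold_inj (t : List (Int × Int × (Int × Int))) (x : Int × Int × (Int × Int)) :
    (t.map pvInj).foldl pvG (pvInj x) = pvInj (t.foldl pvGC x) := by
  induction t generalizing x with
  | nil => rfl
  | cons y t ih =>
    show (t.map pvInj).foldl pvG (pvG (pvInj x) (pvInj y)) = _
    rw [pv_g_inj, ih]
    rfl

-- min? with the first-component key is the running pvGC fold
lemma pv_min?_cons (t : List (Int × Int × (Int × Int))) (x : Int × Int × (Int × Int)) :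
    PySem.List.min? (x :: t) (fun c => c.1) = some (t.foldl pvGC x) := by
  show List.foldl _ (some x) t = _
  induction t generalizing x with
  | nil => rfl
  | cons y t ih =>
    show List.foldl _ (if y.1 < x.1 then some y else some x) t = _
    by_cases h : y.1 < x.1
    · simpa [h, pvGC] using ih y
    · simpa [h, pvGC] using ih x

-- the (1,1) cell is in pvCells when limit ≥ 2, pinning the minimum below target
lemma pv_cell11_mem (target limit : Int) (hl : 2 ≤ limit) :
    (|target - 1|, 1, (1, 1)) ∈ pvCells target limit := by
  unfold pvCells
  rw [List.mem_flatMap]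
  refine ⟨1, (PySem.List.mem_pyRange_one).2 ⟨le_refl 1, by omega⟩, ?_⟩
  rw [List.mem_map]
  refine ⟨1, (PySem.List.mem_pyRange_one).2 ⟨le_refl 1, by omega⟩, ?_⟩
  norm_num

lemma pv_cells_ne_nil (target limit : Int) (hl : 2 ≤ limit) : pvCells target limit ≠ [] := by
  intro h
  have := pv_cell11_mem target limit hl
  rw [h] at this
  exact absurd this (List.not_mem_nil)

-- ===== VERDICT (by name: the statement is the Claim_ definition above) =====
theorem closest_rectangle_spec : Claim_equal_closest_rectangle := by
  intro target limit _ hpre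
  obtain ⟨ht, hl⟩ := hpre
  unfold Spec_closest_rectangle closest_rectangle closest_rectangle_alt
  rcases hc : pvCells target limit with _ | ⟨x, t⟩
  · exact absurd hc (pv_cells_ne_nil target limit hl)
  · -- the common winner: the first minimum of the candidate list
    rcases hm : t.foldl pvGC x with ⟨k, ar, w, h⟩
    have hmin : PySem.List.min? (pvCells target limit) (fun c => c.1) = some (k, ar, (w, h)) := by
      rw [hc, pv_min?_cons, hm]
    -- its key is below target, so A's sentinel never survives
    have h11 : k ≤ |target - 1| := PySem.List.min?_isMin hmin _ (pv_cell11_mem target limit hl)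
    have hkey : k < target := by
      rw [abs_of_nonneg (by omega)] at h11; omega
    have hA : pvLoopA target limit = (k, ar, some (w, h)) := by
      rw [pv_loopA_eq_fold, hc]
      have hmap : ∀ st, List.foldl pvStep st t = (t.map pvInj).foldl pvG st := by
        intro st; rw [List.foldl_map]; rfl
      show List.foldl pvStep (pvStep (target, 0, none) x) t = _
      rw [hmap]
      calc (t.map pvInj).foldl pvG (pvG (target, 0, none) (pvInj x))
            = pvG (target, 0, none) ((t.map pvInj).foldl pvG (pvInj x)) :=
              pv_fold_g_assoc _ _ _
        _ = pvG (target, 0, none) (pvInj (k, ar, (w, h))) := by rw [pv_fold_inj, hm]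
        _ = (k, ar, some (w, h)) := by unfold pvG pvInj; simp [hkey]
    rw [hA, pv_min?_cons, hm]
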